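-- pv_equiv track=rewrite | github.com/EricXue92/hong | pdf_to_excel.py | clean_organization_name
-- ===== SOURCE A (Python) =====
-- from typing import Optional, Tuple
--
-- def clean_organization_name(name: Optional[str]) -> Optional[str]:
--     """Remove form status prefixes from organization name."""
--     if not name:
--         return None
--
--     name = " ".join(name.split()).strip()
--
--     # Remove common form status prefixes
--     prefixes = [
--         "Address change",
--         "Name change",
--         "Initial return",
--         "Final return/terminated",
--         "Final return",
--         "Amended return",
--         "Application pending",
--     ]
--
--     for prefix in prefixes:
--         if name.lower().startswith(prefix.lower() + " "):
--             name = name[len(prefix):].strip()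
--             break
--
--     return name
-- ===== SOURCE B (Python) =====
-- # Token-based rewrite: tokenize once, test the first two words against a set,
-- # and drop them instead of scanning prefixes with startswith/slice.
-- _STATUS_PREFIXES = {
--     "address change",
--     "name change",
--     "initial return",
--     "final return/terminated",
--     "final return",
--     "amended return",
--     "application pending",
-- }
--
-- def clean_organization_name(name):
--     """Remove form status prefixes from organization name."""
--     if not name:
--         return None
--     words = name.split()
--     if len(words) >= 3 and " ".join(words[:2]).lower() in _STATUS_PREFIXES:
--         words = words[2:]
--     return " ".join(words)
-- ===== Notes on version B (the rewrite author's own statement) =====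
-- stated objective: alternative
-- what changed: Replaces the normalize-then-scan-prefixes loop (startswith on the joined string, slice, re-strip) with a single tokenization: split once into words, test the lowercased first two words against a set, and drop two tokens; correct because every status prefix is exactly two whitespace-free words.
import Mathlib
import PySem

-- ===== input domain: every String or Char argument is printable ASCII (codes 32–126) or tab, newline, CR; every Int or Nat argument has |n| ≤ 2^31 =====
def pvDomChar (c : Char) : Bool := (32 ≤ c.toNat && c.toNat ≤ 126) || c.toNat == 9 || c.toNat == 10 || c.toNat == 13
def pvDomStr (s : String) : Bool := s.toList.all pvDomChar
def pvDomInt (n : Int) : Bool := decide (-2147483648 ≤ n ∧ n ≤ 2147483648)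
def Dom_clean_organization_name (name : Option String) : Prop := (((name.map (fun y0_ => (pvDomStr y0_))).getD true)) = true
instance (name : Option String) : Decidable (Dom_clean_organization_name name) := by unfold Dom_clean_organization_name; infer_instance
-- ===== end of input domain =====

-- B tokenizes once and drops the two prefix words after a set test, instead of A's
-- startswith/slice scan over the prefix list on the re-joined string; proved equal on every input.

-- ===== PORT A =====
def pvPrefixes : List String :=
  ["Address change", "Name change", "Initial return", "Final return/terminated",
   "Final return", "Amended return", "Application pending"]

-- the 'for prefix in prefixes: … break' loop of A
def pvStripLoop : List String → String → String
  | [], n => n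
  | p :: ps, n =>
    if PySem.Str.startswith (PySem.Str.lower n) (PySem.Str.lower p ++ " ") then
      PySem.Str.strip (PySem.Str.slice n (some (PySem.Str.len p)) none)
    else pvStripLoop ps n

def clean_organization_name (name : Option String) : Option String :=
  match name with
  | none => none
  | some s =>
    if s = "" then none
    else
      let n := PySem.Str.strip (PySem.Str.join " " (PySem.Str.split₀ s))
      some (pvStripLoop pvPrefixes n)

-- ===== PORT B =====
def pvPrefixSet : PySem.Set String :=
  PySem.Set.ofList
    ["address change", "name change", "initial return", "final return/terminated",
     "final return", "amended return", "application pending"]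

def clean_organization_name_alt (name : Option String) : Option String :=
  match name with
  | none => none
  | some s =>
    if s = "" then none
    else
      let words := PySem.Str.split₀ s
      let words :=
        if 3 ≤ words.length ∧
            PySem.Set.contains pvPrefixSet
              (PySem.Str.lower (PySem.Str.join " " (PySem.List.slice words none (some 2)))) = true then
          PySem.List.slice words (some 2) none
        else words
      some (PySem.Str.join " " words)

-- ===== PRECONDITION & SPEC =====
def Spec_clean_organization_name (name : Option String) (out : Option String) : Prop := out = clean_organization_name_alt name
instance (name : Option String) (out : Option String) : Decidable (Spec_clean_organization_name name out) := by unfold Spec_clean_organization_name; infer_instance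

-- ===== CLAIM (what is proved, stated in full; the proofs are below) =====
def Claim_equal_clean_organization_name : Prop := ∀ (name : Option String), Dom_clean_organization_name name → Spec_clean_organization_name name (clean_organization_name name)

-- ===== LEMMAS AND PROOFS =====

-- a word as produced by str.split(): nonempty and whitespace-free
def pvGoodW (w : List Char) : Prop := w ≠ [] ∧ ∀ c ∈ w, PySem.Chars.isspace c = false
def pvGood (ws : List (List Char)) : Prop := ∀ w ∈ ws, pvGoodW w

theorem pv_go_good : ∀ (rest cur : List Char) (acc : List (List Char)),
    (∀ c ∈ cur, PySem.Chars.isspace c = false) →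
    (∀ w ∈ acc, w ≠ [] ∧ ∀ c ∈ w, PySem.Chars.isspace c = false) →
    pvGood (PySem.Chars.split₀.go rest cur acc)
  | [], cur, acc, hcur, hacc => by
    unfold PySem.Chars.split₀.go
    split
    · intro w hw
      rw [List.mem_reverse] at hw
      exact hacc w hw
    · rename_i hne
      intro w hw
      rw [List.mem_reverse, List.mem_cons] at hw
      rcases hw with rfl | hw
      · refine ⟨by simpa using hne, fun c hc => hcur c (by simpa using hc)⟩
      · exact hacc w hw
  | c :: rest, cur, acc, hcur, hacc => by
    unfold PySem.Chars.split₀.go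
    split
    · split
      · exact pv_go_good rest [] acc (by simp) hacc
      · rename_i hsp hne
        refine pv_go_good rest [] _ (by simp) ?_
        intro w hw
        rw [List.mem_cons] at hw
        rcases hw with rfl | hw
        · exact ⟨by simpa using hne, fun d hd => hcur d (by simpa using hd)⟩
        · exact hacc w hw
    · rename_i hsp
      refine pv_go_good rest (c :: cur) acc ?_ hacc
      intro d hd
      rw [List.mem_cons] at hd
      rcases hd with rfl | hd
      · simpa using hsp
      · exact hcur d hd

theorem pv_split₀_good (cs : List Char) : pvGood (PySem.Chars.split₀ cs) := by
  unfold PySem.Chars.split₀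
  exact pv_go_good cs [] [] (by simp) (by simp)

theorem pv_lowerChar_notspace {c : Char} (h : PySem.Chars.isspace c = false) :
    PySem.Chars.isspace (PySem.Chars.lowerChar c) = false := by
  unfold PySem.Chars.lowerChar
  split
  · rename_i hu
    unfold PySem.Chars.isupper at hu
    have h1 : 65 ≤ c.toNat ∧ c.toNat ≤ 90 := by
      simp [Char.le_def] at hu
      exact ⟨hu.1, hu.2⟩
    have hv : (Char.ofNat (c.toNat + 32)).toNat = c.toNat + 32 := by
      rw [Char.toNat_ofNat]
      have : Nat.isValidChar (c.toNat + 32) := by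
        unfold Nat.isValidChar
        omega
      simp [this]
    unfold PySem.Chars.isspace
    simp only [hv]
    simp
    omega
  · exact h

theorem pv_lowerChar_space : PySem.Chars.lowerChar ' ' = ' ' := by decide

theorem pv_lower_join (ws : List (List Char)) :
    PySem.Chars.lower (PySem.Chars.join [' '] ws)
      = PySem.Chars.join [' '] (ws.map PySem.Chars.lower) := by
  match ws with
  | [] => simp [PySem.Chars.join_nil, PySem.Chars.lower]
  | [w] => simp [PySem.Chars.join_singleton, PySem.Chars.lower]
  | w :: v :: t =>
    have ih := pv_lower_join (v :: t)
    simp only [List.map_cons] at ih ⊢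
    rw [PySem.Chars.join_cons_cons, PySem.Chars.join_cons_cons]
    simp only [PySem.Chars.lower, List.map_append] at ih ⊢
    rw [ih]
    simp [pv_lowerChar_space]

theorem pv_lower_spacefree {w : List Char} (h : ∀ c ∈ w, PySem.Chars.isspace c = false) :
    ∀ c ∈ PySem.Chars.lower w, PySem.Chars.isspace c = false := by
  intro c hc
  simp only [PySem.Chars.lower, List.mem_map] at hc
  obtain ⟨d, hd, rfl⟩ := hc
  exact pv_lowerChar_notspace (h d hd)

theorem pv_space_isspace : PySem.Chars.isspace ' ' = true := by decide

theorem pv_join_ne_nil {ws : List (List Char)} (h : pvGood ws) (hne : ws ≠ []) :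
    PySem.Chars.join [' '] ws ≠ [] := by
  match ws with
  | [] => exact absurd rfl hne
  | [w] =>
    rw [PySem.Chars.join_singleton]; exact (h w (by simp)).1
  | w :: v :: t =>
    rw [PySem.Chars.join_cons_cons]
    intro hc
    have := (h w (by simp)).1
    simp_all

theorem pv_lstrip_join {ws : List (List Char)} (h : pvGood ws) :
    PySem.Chars.lstrip (PySem.Chars.join [' '] ws) = PySem.Chars.join [' '] ws := by
  unfold PySem.Chars.lstrip
  match ws with
  | [] => simp [PySem.Chars.join_nil]
  | [w] =>
    rw [PySem.Chars.join_singleton]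
    obtain ⟨hne, hsp⟩ := h w (by simp)
    match w, hne with
    | c :: w', _ => rw [List.dropWhile_cons_of_neg (by simp [hsp c (by simp)])]
  | w :: v :: t =>
    rw [PySem.Chars.join_cons_cons]
    obtain ⟨hne, hsp⟩ := h w (by simp)
    match w, hne with
    | c :: w', _ =>
      simp only [List.cons_append]
      rw [List.dropWhile_cons_of_neg (by simp [hsp c (by simp)])]

theorem pv_getLast?_join {ws : List (List Char)} (h : pvGood ws) :
    ∀ c, (PySem.Chars.join [' '] ws).getLast? = some c → PySem.Chars.isspace c = false := by
  match ws with
  | [] => intro c hc; rw [PySem.Chars.join_nil] at hc; cases hc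
  | [w] =>
    intro c hc
    rw [PySem.Chars.join_singleton] at hc
    obtain ⟨hne, hsp⟩ := h w (by simp)
    exact hsp c (List.mem_of_getLast? hc)
  | w :: v :: t =>
    intro c hc
    rw [PySem.Chars.join_cons_cons] at hc
    have htail : pvGood (v :: t) := fun x hx => h x (by simp [hx])
    have hne : PySem.Chars.join [' '] (v :: t) ≠ [] := pv_join_ne_nil htail (by simp)
    rw [List.getLast?_append_of_ne_nil _ hne] at hc
    exact pv_getLast?_join htail c hc

theorem pv_rstrip_join {ws : List (List Char)} (h : pvGood ws) :
    PySem.Chars.rstrip (PySem.Chars.join [' '] ws) = PySem.Chars.join [' '] ws := by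
  unfold PySem.Chars.rstrip
  match hj : (PySem.Chars.join [' '] ws).reverse with
  | [] => simp_all
  | c :: r =>
    have hlast : (PySem.Chars.join [' '] ws).getLast? = some c := by
      rw [List.getLast?_eq_head?_reverse, hj]; rfl
    rw [List.dropWhile_cons_of_neg (by simp [pv_getLast?_join h c hlast])]
    rw [← hj, List.reverse_reverse]

theorem pv_strip_join {ws : List (List Char)} (h : pvGood ws) :
    PySem.Chars.strip (PySem.Chars.join [' '] ws) = PySem.Chars.join [' '] ws := by
  unfold PySem.Chars.strip
  rw [pv_lstrip_join h, pv_rstrip_join h]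

theorem pv_strip_space_join {ws : List (List Char)} (h : pvGood ws) :
    PySem.Chars.strip (' ' :: PySem.Chars.join [' '] ws) = PySem.Chars.join [' '] ws := by
  unfold PySem.Chars.strip PySem.Chars.lstrip
  rw [List.dropWhile_cons_of_pos (by decide)]
  have := pv_strip_join h
  unfold PySem.Chars.strip PySem.Chars.lstrip at this
  exact this

theorem pv_prefix_word {a : List Char} {x t u : List Char}
    (ha : ∀ c ∈ a, PySem.Chars.isspace c = false) (hx : ∀ c ∈ x, PySem.Chars.isspace c = false) :
    ((a ++ ' ' :: t) <+: (x ++ ' ' :: u)) ↔ (a = x ∧ t <+: u) := by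
  induction a generalizing x with
  | nil =>
    cases x with
    | nil => simp [List.cons_prefix_cons]
    | cons d x' =>
      simp only [List.nil_append, List.cons_append, List.cons_prefix_cons]
      constructor
      · rintro ⟨rfl, -⟩
        have := hx ' ' (by simp)
        rw [pv_space_isspace] at this; cases this
      · rintro ⟨h, -⟩; cases h
  | cons c a' ih =>
    cases x with
    | nil =>
      simp only [List.cons_append, List.nil_append, List.cons_prefix_cons]
      constructor
      · rintro ⟨rfl, -⟩
        have := ha ' ' (by simp)
        rw [pv_space_isspace] at this; cases this
      · rintro ⟨h, -⟩; cases h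
    | cons d x' =>
      simp only [List.cons_append, List.cons_prefix_cons]
      rw [ih (fun e he => ha e (by simp [he])) (fun e he => hx e (by simp [he]))]
      constructor
      · rintro ⟨rfl, rfl, h⟩; exact ⟨rfl, h⟩
      · rintro ⟨h, hu⟩; cases h; exact ⟨rfl, rfl, hu⟩

theorem pv_prefix_word_false {a t x : List Char}
    (hx : ∀ c ∈ x, PySem.Chars.isspace c = false) : ¬ ((a ++ ' ' :: t) <+: x) := by
  intro h
  have hm : ' ' ∈ x := h.subset (by simp)
  have := hx ' ' hm
  rw [pv_space_isspace] at this; cases this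

theorem pv_seg_eq {a b x u : List Char}
    (ha : ∀ c ∈ a, PySem.Chars.isspace c = false) (hx : ∀ c ∈ x, PySem.Chars.isspace c = false) :
    (a ++ ' ' :: b = x ++ ' ' :: u) ↔ (a = x ∧ b = u) := by
  constructor
  · intro h
    have hp : (a ++ ' ' :: b) <+: (x ++ ' ' :: u) := h ▸ List.prefix_refl _
    obtain ⟨rfl, hbu⟩ := (pv_prefix_word ha hx).1 hp
    have hl : (a ++ ' ' :: b).length = (a ++ ' ' :: u).length := by rw [h]
    simp at hl
    exact ⟨rfl, hbu.eq_of_length (by simp [hl])⟩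
  · rintro ⟨rfl, rfl⟩; rfl

-- ws matches the (lowered) two-word prefix a, b with something left over
def pvM (a b : List Char) (ws : List (List Char)) : Prop :=
  ∃ w1 w2 r, ws = w1 :: w2 :: r ∧ r ≠ [] ∧ PySem.Chars.lower w1 = a ∧ PySem.Chars.lower w2 = b

theorem pv_match_iff {a b : List Char} {ws : List (List Char)}
    (ha : ∀ c ∈ a, PySem.Chars.isspace c = false)
    (hb : ∀ c ∈ b, PySem.Chars.isspace c = false)
    (hg : pvGood ws) :
    ((a ++ ' ' :: (b ++ [' '])) <+: PySem.Chars.join [' '] (ws.map PySem.Chars.lower))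
      ↔ pvM a b ws := by
  match ws with
  | [] =>
    rw [List.map_nil, PySem.Chars.join_nil]
    simp only [pvM]
    constructor
    · intro h; have := h.length_le; simp at this
    · rintro ⟨w1, w2, r, h, -⟩; cases h
  | [w] =>
    rw [List.map_cons, List.map_nil, PySem.Chars.join_singleton]
    constructor
    · intro h
      exact absurd h (pv_prefix_word_false (pv_lower_spacefree (hg w (by simp)).2))
    · rintro ⟨w1, w2, r, h, -⟩; cases h
  | w1 :: w2 :: r =>
    simp only [List.map_cons]
    rw [PySem.Chars.join_cons_cons]
    have hw1 := pv_lower_spacefree (hg w1 (by simp)).2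
    have hw2 := pv_lower_spacefree (hg w2 (by simp)).2
    have harr : PySem.Chars.lower w1 ++ [' '] ++ PySem.Chars.join [' '] (PySem.Chars.lower w2 :: r.map PySem.Chars.lower)
        = PySem.Chars.lower w1 ++ ' ' :: PySem.Chars.join [' '] (PySem.Chars.lower w2 :: r.map PySem.Chars.lower) := by
      simp
    rw [harr, pv_prefix_word ha hw1]
    match r with
    | [] =>
      rw [List.map_nil, PySem.Chars.join_singleton]
      constructor
      · rintro ⟨-, hpre⟩
        exact absurd (by simpa using hpre) (pv_prefix_word_false (t := []) hw2)
      · rintro ⟨v1, v2, s, h, hne, -⟩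
        injection h with h1 h2; injection h2 with h3 h4
        subst h4; exact absurd rfl hne
    | r0 :: r' =>
      rw [List.map_cons, PySem.Chars.join_cons_cons]
      have harr2 : PySem.Chars.lower w2 ++ [' '] ++ PySem.Chars.join [' '] (PySem.Chars.lower r0 :: r'.map PySem.Chars.lower)
          = PySem.Chars.lower w2 ++ ' ' :: PySem.Chars.join [' '] (PySem.Chars.lower r0 :: r'.map PySem.Chars.lower) := by
        simp
      have hb' : (b ++ [' ']) = b ++ ' ' :: ([] : List Char) := by simp
      rw [harr2, hb', pv_prefix_word hb hw2]
      constructor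
      · rintro ⟨h1, h2, -⟩
        exact ⟨w1, w2, r0 :: r', rfl, by simp, h1.symm, h2.symm⟩
      · rintro ⟨v1, v2, s, h, -, hl1, hl2⟩
        injection h with h1 h2; injection h2 with h3 h4
        subst h1; subst h3
        exact ⟨hl1.symm, hl2.symm, List.nil_prefix⟩

-- p's lowered form is the two space-free words a, b
def pvDecomp (p : String) (a b : List Char) : Prop :=
  PySem.Chars.lower p.toList = a ++ ' ' :: b ∧
    (∀ c ∈ a, PySem.Chars.isspace c = false) ∧ (∀ c ∈ b, PySem.Chars.isspace c = false)

theorem pv_sf_of_all {l : List Char} (h : l.all (fun c => !PySem.Chars.isspace c) = true) :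
    ∀ c ∈ l, PySem.Chars.isspace c = false := by
  intro c hc
  simpa using List.all_eq_true.1 h c hc

set_option maxRecDepth 8192 in
theorem pv_low_1 : PySem.Chars.lower ("Address change" : String).toList = ("address change" : String).toList := by decide
theorem pv_split_1 : ("address change" : String).toList = "address".toList ++ ' ' :: "change".toList := by decide
theorem pv_sf_a_1 : ∀ c ∈ ("address" : String).toList, PySem.Chars.isspace c = false :=
  pv_sf_of_all (by decide)
theorem pv_sf_b_1 : ∀ c ∈ ("change" : String).toList, PySem.Chars.isspace c = false :=
  pv_sf_of_all (by decide)
theorem pv_dec_1 : pvDecomp "Address change" "address".toList "change".toList :=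
  ⟨by rw [pv_low_1, pv_split_1], pv_sf_a_1, pv_sf_b_1⟩

set_option maxRecDepth 8192 in
theorem pv_low_2 : PySem.Chars.lower ("Name change" : String).toList = ("name change" : String).toList := by decide
theorem pv_split_2 : ("name change" : String).toList = "name".toList ++ ' ' :: "change".toList := by decide
theorem pv_sf_a_2 : ∀ c ∈ ("name" : String).toList, PySem.Chars.isspace c = false :=
  pv_sf_of_all (by decide)
theorem pv_sf_b_2 : ∀ c ∈ ("change" : String).toList, PySem.Chars.isspace c = false :=
  pv_sf_of_all (by decide)
theorem pv_dec_2 : pvDecomp "Name change" "name".toList "change".toList :=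
  ⟨by rw [pv_low_2, pv_split_2], pv_sf_a_2, pv_sf_b_2⟩

set_option maxRecDepth 8192 in
theorem pv_low_3 : PySem.Chars.lower ("Initial return" : String).toList = ("initial return" : String).toList := by decide
theorem pv_split_3 : ("initial return" : String).toList = "initial".toList ++ ' ' :: "return".toList := by decide
theorem pv_sf_a_3 : ∀ c ∈ ("initial" : String).toList, PySem.Chars.isspace c = false :=
  pv_sf_of_all (by decide)
theorem pv_sf_b_3 : ∀ c ∈ ("return" : String).toList, PySem.Chars.isspace c = false :=
  pv_sf_of_all (by decide)
theorem pv_dec_3 : pvDecomp "Initial return" "initial".toList "return".toList :=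
  ⟨by rw [pv_low_3, pv_split_3], pv_sf_a_3, pv_sf_b_3⟩

set_option maxRecDepth 8192 in
theorem pv_low_4 : PySem.Chars.lower ("Final return/terminated" : String).toList = ("final return/terminated" : String).toList := by decide
theorem pv_split_4 : ("final return/terminated" : String).toList = "final".toList ++ ' ' :: "return/terminated".toList := by decide
theorem pv_sf_a_4 : ∀ c ∈ ("final" : String).toList, PySem.Chars.isspace c = false :=
  pv_sf_of_all (by decide)
theorem pv_sf_b_4 : ∀ c ∈ ("return/terminated" : String).toList, PySem.Chars.isspace c = false :=
  pv_sf_of_all (by decide)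
theorem pv_dec_4 : pvDecomp "Final return/terminated" "final".toList "return/terminated".toList :=
  ⟨by rw [pv_low_4, pv_split_4], pv_sf_a_4, pv_sf_b_4⟩

set_option maxRecDepth 8192 in
theorem pv_low_5 : PySem.Chars.lower ("Final return" : String).toList = ("final return" : String).toList := by decide
theorem pv_split_5 : ("final return" : String).toList = "final".toList ++ ' ' :: "return".toList := by decide
theorem pv_sf_a_5 : ∀ c ∈ ("final" : String).toList, PySem.Chars.isspace c = false :=
  pv_sf_of_all (by decide)
theorem pv_sf_b_5 : ∀ c ∈ ("return" : String).toList, PySem.Chars.isspace c = false :=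
  pv_sf_of_all (by decide)
theorem pv_dec_5 : pvDecomp "Final return" "final".toList "return".toList :=
  ⟨by rw [pv_low_5, pv_split_5], pv_sf_a_5, pv_sf_b_5⟩

set_option maxRecDepth 8192 in
theorem pv_low_6 : PySem.Chars.lower ("Amended return" : String).toList = ("amended return" : String).toList := by decide
theorem pv_split_6 : ("amended return" : String).toList = "amended".toList ++ ' ' :: "return".toList := by decide
theorem pv_sf_a_6 : ∀ c ∈ ("amended" : String).toList, PySem.Chars.isspace c = false :=
  pv_sf_of_all (by decide)
theorem pv_sf_b_6 : ∀ c ∈ ("return" : String).toList, PySem.Chars.isspace c = false :=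
  pv_sf_of_all (by decide)
theorem pv_dec_6 : pvDecomp "Amended return" "amended".toList "return".toList :=
  ⟨by rw [pv_low_6, pv_split_6], pv_sf_a_6, pv_sf_b_6⟩

set_option maxRecDepth 8192 in
theorem pv_low_7 : PySem.Chars.lower ("Application pending" : String).toList = ("application pending" : String).toList := by decide
theorem pv_split_7 : ("application pending" : String).toList = "application".toList ++ ' ' :: "pending".toList := by decide
theorem pv_sf_a_7 : ∀ c ∈ ("application" : String).toList, PySem.Chars.isspace c = false :=
  pv_sf_of_all (by decide)
theorem pv_sf_b_7 : ∀ c ∈ ("pending" : String).toList, PySem.Chars.isspace c = false :=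
  pv_sf_of_all (by decide)
theorem pv_dec_7 : pvDecomp "Application pending" "application".toList "pending".toList :=
  ⟨by rw [pv_low_7, pv_split_7], pv_sf_a_7, pv_sf_b_7⟩


theorem pv_ofList_eq {l : List Char} {t : String} : String.ofList l = t ↔ l = t.toList := by
  constructor
  · intro h; rw [← h, String.toList_ofList]
  · intro h; rw [h, String.ofList_toList]

theorem pv_eq_ofList {l : List Char} {t : String} : t = String.ofList l ↔ t.toList = l := by
  rw [eq_comm, pv_ofList_eq, eq_comm]

-- the startswith test of A's loop, decoded through pv_match_iff
theorem pv_cond_iff {p : String} {a b : List Char} {ws : List (List Char)}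
    (hd : pvDecomp p a b) (hg : pvGood ws) :
    (PySem.Str.startswith (PySem.Str.lower (String.ofList (PySem.Chars.join [' '] ws)))
        (PySem.Str.lower p ++ " ") = true) ↔ pvM a b ws := by
  rw [PySem.Str.startswith_eq, PySem.Chars.startswith_iff]
  have h1 : (PySem.Str.lower p ++ " ").toList = a ++ ' ' :: (b ++ [' ']) := by
    simp [PySem.Str.toList_lower, hd.1]
  have h2 : (PySem.Str.lower (String.ofList (PySem.Chars.join [' '] ws))).toList
      = PySem.Chars.join [' '] (ws.map PySem.Chars.lower) := by
    simp [PySem.Str.toList_lower, pv_lower_join]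
  rw [h1, h2]
  exact pv_match_iff hd.2.1 hd.2.2 hg

-- A's sliced-and-stripped value on a match
theorem pv_slice_result {p : String} {a b : List Char} {w1 w2 : List Char} {r : List (List Char)}
    (hd : pvDecomp p a b) (hg : pvGood (w1 :: w2 :: r)) (hrne : r ≠ [])
    (hl1 : PySem.Chars.lower w1 = a) (hl2 : PySem.Chars.lower w2 = b) :
    PySem.Str.strip (PySem.Str.slice (String.ofList (PySem.Chars.join [' '] (w1 :: w2 :: r)))
        (some (PySem.Str.len p)) none)
      = String.ofList (PySem.Chars.join [' '] r) := by
  have hgr : pvGood r := fun x hx => hg x (by simp [hx])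
  have hlow : (PySem.Chars.lower p.toList).length = p.toList.length := by
    simp [PySem.Chars.lower]
  have hlen : p.toList.length = a.length + 1 + b.length := by
    rw [← hlow, hd.1]; simp; omega
  have hw1 : w1.length = a.length := by rw [← hl1]; simp [PySem.Chars.lower]
  have hw2 : w2.length = b.length := by rw [← hl2]; simp [PySem.Chars.lower]
  have hj : PySem.Chars.join [' '] (w1 :: w2 :: r)
      = (w1 ++ ' ' :: w2) ++ (' ' :: PySem.Chars.join [' '] r) := by
    rw [PySem.Chars.join_cons_cons]
    match r, hrne with
    | r0 :: r', _ => rw [PySem.Chars.join_cons_cons]; simp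
  have key : (PySem.Str.strip (PySem.Str.slice (String.ofList (PySem.Chars.join [' '] (w1 :: w2 :: r)))
        (some (PySem.Str.len p)) none)).toList = PySem.Chars.join [' '] r := by
    rw [PySem.Str.toList_strip, PySem.Str.toList_slice]
    rw [String.toList_ofList, PySem.Chars.slice_eq_listSlice]
    rw [PySem.List.slice_from _ (a := PySem.Str.len p) (by rw [PySem.Str.len_eq]; exact Int.natCast_nonneg _)]
    have htoNat : (PySem.Str.len p).toNat = a.length + 1 + b.length := by
      rw [PySem.Str.len_eq, Int.toNat_natCast, hlen]
    rw [htoNat, hj, List.drop_left' (by simp [hw1, hw2]; omega)]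
    exact pv_strip_space_join hgr
  calc PySem.Str.strip (PySem.Str.slice (String.ofList (PySem.Chars.join [' '] (w1 :: w2 :: r)))
        (some (PySem.Str.len p)) none)
      = String.ofList ((PySem.Str.strip (PySem.Str.slice (String.ofList (PySem.Chars.join [' '] (w1 :: w2 :: r)))
        (some (PySem.Str.len p)) none)).toList) := String.ofList_toList.symm
    _ = String.ofList (PySem.Chars.join [' '] r) := by rw [key]

-- A's loop when some prefix matches: it strips the first two words
theorem pv_loop_match : ∀ (ps : List String) (ws : List (List Char)),
    pvGood ws →
    (∀ p ∈ ps, ∃ a b, pvDecomp p a b) →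
    (∃ p ∈ ps, ∃ a b, pvDecomp p a b ∧ pvM a b ws) →
    pvStripLoop ps (String.ofList (PySem.Chars.join [' '] ws))
      = String.ofList (PySem.Chars.join [' '] (ws.drop 2))
  | [], ws, _, _, hex => by simp at hex
  | p0 :: ps, ws, hg, hdec, hex => by
    obtain ⟨a0, b0, hd0⟩ := hdec p0 (by simp)
    unfold pvStripLoop
    by_cases hm : pvM a0 b0 ws
    · rw [if_pos ((pv_cond_iff hd0 hg).2 hm)]
      obtain ⟨w1, w2, r, rfl, hrne, hl1, hl2⟩ := hm
      rw [pv_slice_result hd0 hg hrne hl1 hl2]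
      simp
    · rw [if_neg (fun hc => hm ((pv_cond_iff hd0 hg).1 hc))]
      refine pv_loop_match ps ws hg (fun p hp => hdec p (by simp [hp])) ?_
      obtain ⟨p, hp, a, b, hd, hm'⟩ := hex
      rw [List.mem_cons] at hp
      rcases hp with rfl | hp
      · exfalso
        have heq := hd.1.symm.trans hd0.1
        rw [pv_seg_eq hd.2.1 hd0.2.1] at heq
        exact hm (heq.1 ▸ heq.2 ▸ hm')
      · exact ⟨p, hp, a, b, hd, hm'⟩

-- A's loop when no prefix matches: it returns the name unchanged
theorem pv_loop_nomatch : ∀ (ps : List String) (ws : List (List Char)),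
    pvGood ws →
    (∀ p ∈ ps, ∃ a b, pvDecomp p a b) →
    (∀ p ∈ ps, ∀ a b, pvDecomp p a b → ¬ pvM a b ws) →
    pvStripLoop ps (String.ofList (PySem.Chars.join [' '] ws))
      = String.ofList (PySem.Chars.join [' '] ws)
  | [], ws, _, _, _ => rfl
  | p0 :: ps, ws, hg, hdec, hno => by
    obtain ⟨a0, b0, hd0⟩ := hdec p0 (by simp)
    unfold pvStripLoop
    rw [if_neg (fun hc => hno p0 (by simp) a0 b0 hd0 ((pv_cond_iff hd0 hg).1 hc))]
    exact pv_loop_nomatch ps ws hg (fun p hp => hdec p (by simp [hp]))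
      (fun p hp => hno p (by simp [hp]))

-- every prefix in A's list decomposes into two space-free words
theorem pv_prefixes_decomp : ∀ p ∈ pvPrefixes, ∃ a b, pvDecomp p a b := by
  intro p hp
  simp only [pvPrefixes, List.mem_cons, List.not_mem_nil, or_false] at hp
  rcases hp with rfl | rfl | rfl | rfl | rfl | rfl | rfl
  · exact ⟨_, _, pv_dec_1⟩
  · exact ⟨_, _, pv_dec_2⟩
  · exact ⟨_, _, pv_dec_3⟩
  · exact ⟨_, _, pv_dec_4⟩
  · exact ⟨_, _, pv_dec_5⟩
  · exact ⟨_, _, pv_dec_6⟩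
  · exact ⟨_, _, pv_dec_7⟩

-- the key B hashes, in char form
theorem pv_key_eq {w1 w2 : List Char} {r : List (List Char)} :
    PySem.Str.lower (PySem.Str.join " "
        (PySem.List.slice ((w1 :: w2 :: r).map String.ofList) none (some 2)))
      = String.ofList (PySem.Chars.lower w1 ++ ' ' :: PySem.Chars.lower w2) := by
  rw [pv_eq_ofList, PySem.Str.toList_lower, PySem.Str.toList_join]
  have h2 : PySem.List.slice ((w1 :: w2 :: r).map String.ofList) none (some 2)
      = [String.ofList w1, String.ofList w2] := by
    rw [PySem.List.slice_to _ (by norm_num)]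
    simp
  rw [h2]
  simp only [List.map_cons, List.map_nil, String.toList_ofList]
  rw [PySem.Chars.join_cons_cons, PySem.Chars.join_singleton]
  have hsep : (" " : String).toList = [' '] := rfl
  rw [hsep]
  simp [PySem.Chars.lower, pv_lowerChar_space]

-- B's set test, decoded: it holds exactly when some prefix of A's list matches
theorem pv_bcond_iff {ws : List (List Char)} (hg : pvGood ws) :
    (3 ≤ (ws.map String.ofList).length ∧
        PySem.Set.contains pvPrefixSet
          (PySem.Str.lower (PySem.Str.join " "
            (PySem.List.slice (ws.map String.ofList) none (some 2)))) = true)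
      ↔ (∃ p ∈ pvPrefixes, ∃ a b, pvDecomp p a b ∧ pvM a b ws) := by
  match ws with
  | [] => constructor
          · rintro ⟨h3, -⟩; simp at h3
          · rintro ⟨p, -, a, b, -, w1, w2, r, h, -⟩; cases h
  | [w] => constructor
           · rintro ⟨h3, -⟩; simp at h3
           · rintro ⟨p, -, a, b, -, w1, w2, r, h, -⟩; cases h
  | [w1, w2] => constructor
                · rintro ⟨h3, -⟩; simp at h3
                · rintro ⟨p, -, a, b, -, v1, v2, r, h, hr, -⟩
                  injection h with h1 h2; injection h2 with h3 h4
                  exact absurd h4.symm hr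
  | w1 :: w2 :: r0 :: r' =>
    have hsp1 := pv_lower_spacefree (hg w1 (by simp)).2
    rw [pv_key_eq]
    have hcontains : (PySem.Set.contains pvPrefixSet
        (String.ofList (PySem.Chars.lower w1 ++ ' ' :: PySem.Chars.lower w2)) = true)
        ↔ (String.ofList (PySem.Chars.lower w1 ++ ' ' :: PySem.Chars.lower w2)) ∈
            (["address change", "name change", "initial return", "final return/terminated",
              "final return", "amended return", "application pending"] : List String) := by
      unfold PySem.Set.contains
      rw [List.contains_iff_mem]
      exact PySem.Set.mem_ofList _ _
    constructor
    · rintro ⟨-, hc⟩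
      rw [hcontains] at hc
      simp only [List.mem_cons, List.not_mem_nil, or_false, pv_ofList_eq] at hc
      rcases hc with hc | hc | hc | hc | hc | hc | hc
      · refine ⟨"Address change", by simp [pvPrefixes], "address".toList, "change".toList,
          pv_dec_1, w1, w2, r0 :: r', rfl, by simp, ?_⟩
        rw [pv_split_1] at hc
        exact (pv_seg_eq hsp1 pv_sf_a_1).1 hc
      · refine ⟨"Name change", by simp [pvPrefixes], "name".toList, "change".toList,
          pv_dec_2, w1, w2, r0 :: r', rfl, by simp, ?_⟩
        rw [pv_split_2] at hc
        exact (pv_seg_eq hsp1 pv_sf_a_2).1 hc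
      · refine ⟨"Initial return", by simp [pvPrefixes], "initial".toList, "return".toList,
          pv_dec_3, w1, w2, r0 :: r', rfl, by simp, ?_⟩
        rw [pv_split_3] at hc
        exact (pv_seg_eq hsp1 pv_sf_a_3).1 hc
      · refine ⟨"Final return/terminated", by simp [pvPrefixes], "final".toList, "return/terminated".toList,
          pv_dec_4, w1, w2, r0 :: r', rfl, by simp, ?_⟩
        rw [pv_split_4] at hc
        exact (pv_seg_eq hsp1 pv_sf_a_4).1 hc
      · refine ⟨"Final return", by simp [pvPrefixes], "final".toList, "return".toList,
          pv_dec_5, w1, w2, r0 :: r', rfl, by simp, ?_⟩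
        rw [pv_split_5] at hc
        exact (pv_seg_eq hsp1 pv_sf_a_5).1 hc
      · refine ⟨"Amended return", by simp [pvPrefixes], "amended".toList, "return".toList,
          pv_dec_6, w1, w2, r0 :: r', rfl, by simp, ?_⟩
        rw [pv_split_6] at hc
        exact (pv_seg_eq hsp1 pv_sf_a_6).1 hc
      · refine ⟨"Application pending", by simp [pvPrefixes], "application".toList, "pending".toList,
          pv_dec_7, w1, w2, r0 :: r', rfl, by simp, ?_⟩
        rw [pv_split_7] at hc
        exact (pv_seg_eq hsp1 pv_sf_a_7).1 hc
    · rintro ⟨p, hp, a, b, hd, v1, v2, s, heq, hne, hl1, hl2⟩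
      injection heq with e1 e2; injection e2 with e3 e4
      subst e1; subst e3
      refine ⟨by simp, ?_⟩
      rw [hcontains]
      have hkey : PySem.Chars.lower w1 ++ ' ' :: PySem.Chars.lower w2 = PySem.Chars.lower p.toList := by
        rw [hl1, hl2, hd.1]
      simp only [pvPrefixes, List.mem_cons, List.not_mem_nil, or_false] at hp
      rcases hp with rfl | rfl | rfl | rfl | rfl | rfl | rfl
      · rw [hkey, pv_low_1, String.ofList_toList]; simp
      · rw [hkey, pv_low_2, String.ofList_toList]; simp
      · rw [hkey, pv_low_3, String.ofList_toList]; simp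
      · rw [hkey, pv_low_4, String.ofList_toList]; simp
      · rw [hkey, pv_low_5, String.ofList_toList]; simp
      · rw [hkey, pv_low_6, String.ofList_toList]; simp
      · rw [hkey, pv_low_7, String.ofList_toList]; simp

-- the normalized name A computes is the space-join of the split words
theorem pv_norm_eq (s : String) :
    PySem.Str.strip (PySem.Str.join " " (PySem.Str.split₀ s))
      = String.ofList (PySem.Chars.join [' '] (PySem.Chars.split₀ s.toList)) := by
  rw [pv_eq_ofList, PySem.Str.toList_strip, PySem.Str.toList_join]
  have hws : PySem.Str.split₀ s = (PySem.Chars.split₀ s.toList).map String.ofList := rfl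
  rw [hws]
  simp only [List.map_map]
  have hmaps : ((PySem.Chars.split₀ s.toList).map (String.toList ∘ String.ofList))
      = PySem.Chars.split₀ s.toList := by
    simp only [Function.comp_def, String.toList_ofList, List.map_id']
  rw [hmaps]
  have hsep : (" " : String).toList = [' '] := rfl
  rw [hsep]
  exact pv_strip_join (pv_split₀_good s.toList)

-- B's final join, in char form
theorem pv_join_words (xs : List (List Char)) :
    PySem.Str.join " " (xs.map String.ofList)
      = String.ofList (PySem.Chars.join [' '] xs) := by
  rw [pv_eq_ofList, PySem.Str.toList_join]
  simp only [List.map_map]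
  have hmaps : (xs.map (String.toList ∘ String.ofList)) = xs := by simp only [Function.comp_def, String.toList_ofList, List.map_id']
  rw [hmaps]
  have hsep : (" " : String).toList = [' '] := rfl
  rw [hsep]

-- ===== VERDICT (by name: the statement is the Claim_ definition above) =====
theorem clean_organization_name_spec : Claim_equal_clean_organization_name := by
  intro name _
  unfold Spec_clean_organization_name clean_organization_name clean_organization_name_alt
  match name with
  | none => rfl
  | some s =>
    by_cases hs : s = ""
    · simp [hs]
    · simp only [if_neg hs]
      have hws : PySem.Str.split₀ s = (PySem.Chars.split₀ s.toList).map String.ofList := rfl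
      have hg : pvGood (PySem.Chars.split₀ s.toList) := pv_split₀_good s.toList
      rw [pv_norm_eq s, hws]
      by_cases hc : (3 ≤ ((PySem.Chars.split₀ s.toList).map String.ofList).length ∧
          PySem.Set.contains pvPrefixSet
            (PySem.Str.lower (PySem.Str.join " "
              (PySem.List.slice ((PySem.Chars.split₀ s.toList).map String.ofList) none (some 2)))) = true)
      · rw [if_pos hc]
        rw [pv_loop_match pvPrefixes (PySem.Chars.split₀ s.toList) hg pv_prefixes_decomp
          ((pv_bcond_iff hg).1 hc)]
        rw [PySem.List.slice_from _ (a := 2) (by norm_num)]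
        have h2 : ((2 : Int)).toNat = 2 := rfl
        rw [h2, ← List.map_drop, pv_join_words]
      · rw [if_neg hc]
        rw [pv_loop_nomatch pvPrefixes (PySem.Chars.split₀ s.toList) hg pv_prefixes_decomp
          (fun p hp a b hd hm => hc ((pv_bcond_iff hg).2 ⟨p, hp, a, b, hd, hm⟩))]
        rw [pv_join_words]
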